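-- pv_equiv track=rewrite | github.com/raffg/harry_potter_nlp | src/general.py | split_after
-- ===== SOURCE A (Python) =====
-- def split_after(values, splits):
--     """
--     Split a sequence into sub-sequences immediately after locations indicated by the sequence of splits.
--
--     :param values: sequence to split
--     :param splits: boolean sequence of split locations; should be equal in length to `values`
--     :return: iterator of lists, each of which is a sub-sequence
--     """
--     subseq = []
--     for value, split in zip(values, splits):
--         subseq.append(value)
--         if split:
--             yield subseq
--             subseq = []
--     if subseq:
--         yield subseq
-- ===== SOURCE B (Python) =====
-- def split_after(values, splits):
--     # Different decomposition: assign each element a monotone group key (count of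
--     # True splits strictly before it), then group consecutive equal keys.
--     keyed = []
--     key = 0
--     for value, split in zip(values, splits):
--         keyed.append((key, value))
--         key += split
--     if keyed:
--         cur_key, first = keyed[0]
--         group = [first]
--         for k, v in keyed[1:]:
--             if k == cur_key:
--                 group.append(v)
--             else:
--                 yield group
--                 cur_key, group = k, [v]
--         yield group
-- ===== Notes on version B (the rewrite author's own statement) =====
-- stated objective: alternative
-- what changed: B replaces A's yield-on-flag buffer bookkeeping by a two-phase decomposition: first label each zipped element with a monotone group key (the count of True splits strictly before it), then group consecutive elements with equal keys, the final group being emitted unconditionally.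
import Mathlib
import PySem

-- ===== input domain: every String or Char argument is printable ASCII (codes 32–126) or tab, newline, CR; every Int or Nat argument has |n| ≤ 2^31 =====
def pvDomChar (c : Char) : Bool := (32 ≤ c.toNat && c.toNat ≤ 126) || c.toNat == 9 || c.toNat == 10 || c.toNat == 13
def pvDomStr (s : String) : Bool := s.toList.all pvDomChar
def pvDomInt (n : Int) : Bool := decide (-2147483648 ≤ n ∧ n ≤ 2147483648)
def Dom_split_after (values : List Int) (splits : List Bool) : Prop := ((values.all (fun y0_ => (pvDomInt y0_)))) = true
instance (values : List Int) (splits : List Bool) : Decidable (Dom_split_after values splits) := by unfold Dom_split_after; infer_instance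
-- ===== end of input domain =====

-- B: alternative decomposition (key-labelling pass + consecutive grouping pass); same return value as A, which is a generator (proved about the list of yielded values).
-- ===== PORT A =====
-- the for-loop over zip(values, splits) with accumulator subseq, then the trailing 'if subseq: yield subseq'
def goA : List (Int × Bool) → List Int → List (List Int)
  | [], subseq => if subseq.isEmpty then [] else [subseq]
  | (value, split) :: rest, subseq =>
    let subseq' := subseq ++ [value]
    if split then subseq' :: goA rest [] else goA rest subseq'

def split_after (values : List Int) (splits : List Bool) : List (List Int) :=
  goA (values.zip splits) []

-- ===== PORT B =====
-- phase 1 of Source B: label each zipped element with the running key (key += split)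
def keyedB : List (Int × Bool) → Int → List (Int × Int)
  | [], _ => []
  | (value, split) :: rest, key =>
    (key, value) :: keyedB rest (if split then key + 1 else key)

-- phase 2 of Source B: the for-loop over keyed[1:] grouping consecutive equal keys; the final group is yielded unconditionally
def grpB : Int → List Int → List (Int × Int) → List (List Int)
  | _, group, [] => [group]
  | curKey, group, (k, v) :: rest =>
    if k = curKey then grpB curKey (group ++ [v]) rest
    else group :: grpB k [v] rest

def split_after_alt (values : List Int) (splits : List Bool) : List (List Int) :=
  match keyedB (values.zip splits) 0 with
  | [] => []
  | (curKey, first) :: rest => grpB curKey [first] rest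

-- ===== PRECONDITION & SPEC =====
def Spec_split_after (values : List Int) (splits : List Bool) (out : List (List Int)) : Prop := out = split_after_alt values splits
instance (values : List Int) (splits : List Bool) (out : List (List Int)) : Decidable (Spec_split_after values splits out) := by unfold Spec_split_after; infer_instance

-- ===== CLAIM (what is proved, stated in full; the proofs are below) =====
def Claim_equal_split_after : Prop := ∀ (values : List Int) (splits : List Bool), Dom_split_after values splits → Spec_split_after values splits (split_after values splits)

-- ===== LEMMAS AND PROOFS =====


-- Top-level B on an already-keyed list (the 'if keyed:' dispatch of Source B), for the loop invariant
def grpTopB (ks : List (Int × Int)) : List (List Int) :=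
  match ks with
  | [] => []
  | (curKey, first) :: rest => grpB curKey [first] rest

-- Loop invariant: A's accumulator loop equals B's grouping of the keyed list,
-- for any starting key; an empty accumulator corresponds to the top-level dispatch.
theorem goA_eq_grp (zs : List (Int × Bool)) : ∀ (k : Int) (cur : List Int),
    goA zs cur = (if cur.isEmpty then grpTopB (keyedB zs k)
                  else grpB k cur (keyedB zs k)) := by
  induction zs with
  | nil =>
    intro k cur
    cases cur <;> simp [goA, keyedB, grpTopB, grpB]
  | cons p rest ih =>
    obtain ⟨v, s⟩ := p
    intro k cur
    have hmain : goA ((v, s) :: rest) cur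
        = grpB k (cur ++ [v]) (keyedB rest (if s then k + 1 else k)) := by
      cases s with
      | false =>
        have := ih k (cur ++ [v])
        simp [goA] at this ⊢
        simpa using this
      | true =>
        simp only [goA]
        cases rest with
        | nil => simp [keyedB, grpB, goA]
        | cons q rs =>
          obtain ⟨w, t⟩ := q
          have hz : goA ((w, t) :: rs) [] = grpTopB (keyedB ((w, t) :: rs) (k + 1)) := by
            simpa using ih (k + 1) ([] : List Int)
          have hne : (k : Int) + 1 ≠ k := by omega
          simp [keyedB, grpB, grpTopB, hne, hz]
    cases cur with
    | nil => simpa [keyedB, grpTopB] using hmain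
    | cons c cs =>
      have : grpB k ((c :: cs) ++ [v]) (keyedB rest (if s then k + 1 else k))
          = grpB k (c :: cs) (keyedB ((v, s) :: rest) k) := by
        simp [keyedB, grpB]
      rw [hmain, this]
      simp

-- ===== VERDICT (by name: the statement is the Claim_ definition above) =====
theorem split_after_spec : Claim_equal_split_after := by
  intro values splits _
  unfold Spec_split_after split_after split_after_alt
  have := goA_eq_grp (values.zip splits) 0 []
  simpa [grpTopB] using this
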